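-- pv_equiv track=rewrite | github.com/AlSavIg/NTI_2020 | Problem_3/NTIs_solve.py | get_shape
-- ===== SOURCE A (Python) =====
-- def find_bound(lst):
--     s = -1
--     e = -1
--     for i in range(1, len(lst)):
--         if lst[i - 1] == 0 and lst[i] != 0:
--             s = i
--         if lst[i] != 0 and lst[i + 1] == 0:
--             e = i
--         if s > 0 and e > 0:
--             return s, e
--     raise RuntimeError("No bounds!")
--
-- def copy(m):
--     lm = []
--     for i in range(len(m)):
--         l = []
--         for j in range(len(m[0])):
--             l.append(m[i][j])
--         lm.append(l)
--     return lm
--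
-- def clean_m(m, label):
--     lm = copy(m)
--     for i in range(len(lm)):
--         for j in range(len(lm[0])):
--             if lm[i][j] != label:
--                 lm[i][j] = 0
--     return lm
--
-- def get_shape(m, label):
--     lm = clean_m(m, label)
--     rows = [sum(row) for row in lm]
--     cols = []
--     for i in range(len(lm[0])):
--         col = []
--         for j in range(len(lm)):
--             col.append(lm[j][i])
--         cols.append(sum(col))
--
--     rs, re = find_bound(rows)
--     cs, ce = find_bound(cols)
--
--     rsize = (re - rs) + 1
--     csize = (ce - cs) + 1
--     return rsize, csize
-- ===== SOURCE B (Python) =====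
-- def find_bound(lst):
--     s = -1
--     e = -1
--     for i in range(1, len(lst)):
--         if lst[i - 1] == 0 and lst[i] != 0:
--             s = i
--         if lst[i] != 0 and lst[i + 1] == 0:
--             e = i
--         if s > 0 and e > 0:
--             return s, e
--     raise RuntimeError("No bounds!")
--
--
-- def get_shape(m, label):
--     # single pass over the matrix: build the row sums and column sums directly
--     w = len(m[0])
--     rows = []
--     cols = [0] * w
--     for row in m:
--         rows.append(sum(label for x in row[:w] if x == label))
--         cols = [c + (label if x == label else 0) for c, x in zip(cols, row)]
--     rs, re = find_bound(rows)
--     cs, ce = find_bound(cols)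
--     return (re - rs) + 1, (ce - cs) + 1
-- ===== Notes on version B (the rewrite author's own statement) =====
-- stated objective: simpler
-- what changed: B keeps find_bound verbatim but replaces A's four passes (copy, clean_m, per-row sums, transpose-style per-column sums) by a single pass over the matrix that accumulates the row sums and column sums directly (adding the label value itself, so the zero/nonzero pattern is unchanged), with no intermediate copied matrix.
import Mathlib
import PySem

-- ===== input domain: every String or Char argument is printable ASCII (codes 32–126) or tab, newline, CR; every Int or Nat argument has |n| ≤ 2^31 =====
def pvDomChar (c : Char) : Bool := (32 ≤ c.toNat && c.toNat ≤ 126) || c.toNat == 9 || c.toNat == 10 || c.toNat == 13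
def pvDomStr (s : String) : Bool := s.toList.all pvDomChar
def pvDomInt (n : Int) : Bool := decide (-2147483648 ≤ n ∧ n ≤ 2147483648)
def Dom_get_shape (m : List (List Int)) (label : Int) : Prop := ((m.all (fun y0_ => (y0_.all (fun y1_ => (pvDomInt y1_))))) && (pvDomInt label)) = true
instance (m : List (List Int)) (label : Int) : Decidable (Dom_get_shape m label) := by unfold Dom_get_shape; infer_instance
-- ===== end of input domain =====

-- B replaces A's copy/clean/row-sum/transpose-column-sum chain by one pass over the matrix
-- that builds the row sums and column sums directly (no intermediate copied matrix).

-- ===== PORT A =====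
-- find_bound: `none` models the Python exceptions (RuntimeError / IndexError on lst[i+1])
def pvFindBoundGo (lst : List Int) (idxs : List Int) (s e : Int) : Option (Int × Int) :=
  match idxs with
  | [] => none                              -- loop ends: RuntimeError("No bounds!")
  | i :: rest =>
    match PySem.List.pyGet? lst (i - 1), PySem.List.pyGet? lst i with
    | some a, some b =>
      let s' := if a = 0 ∧ b ≠ 0 then i else s
      if b ≠ 0 then
        match PySem.List.pyGet? lst (i + 1) with   -- lst[i+1] (short-circuited: only when lst[i] != 0)
        | none => none                              -- IndexError
        | some c =>
          let e' := if c = 0 then i else e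
          if s' > 0 ∧ e' > 0 then some (s', e') else pvFindBoundGo lst rest s' e'
      else
        if s' > 0 ∧ e > 0 then some (s', e) else pvFindBoundGo lst rest s' e
    | _, _ => none

def pvFindBound (lst : List Int) : Option (Int × Int) :=
  pvFindBoundGo lst (PySem.List.pyRange 1 lst.length 1) (-1) (-1)

-- inner loop of copy: l = []; for j in range(len(m[0])): l.append(m[i][j])
def pvCopyRow (m : List (List Int)) (w : Nat) (i : Nat) : Option (List Int) :=
  (List.range w).foldl
    (fun acc (j : Nat) => acc.bind (fun l =>
      ((PySem.List.pyGet? m (i : Int)).bind (fun row => PySem.List.pyGet? row (j : Int))).map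
        (fun v => l ++ [v])))
    (some [])

-- copy(m); `none` = IndexError (len(m[0]) on empty m, or m[i][j] on a too-short row)
def pvCopy (m : List (List Int)) : Option (List (List Int)) :=
  match m with
  | [] => none
  | r0 :: _ =>
    (List.range m.length).foldl
      (fun acc (i : Nat) => acc.bind (fun lm => (pvCopyRow m r0.length i).map (fun l => lm ++ [l])))
      (some [])

-- clean_m: set every entry ≠ label to 0 (the copied matrix is rectangular of width len(m[0]))
def pvClean (lm : List (List Int)) (label : Int) : List (List Int) :=
  lm.map (fun r => r.map (fun x => if x ≠ label then 0 else x))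

def get_shape (m : List (List Int)) (label : Int) : Int × Int :=
  match pvCopy m with
  | none => (0, 0)                           -- IndexError; excluded by Pre_
  | some lm0 =>
    let lm := pvClean lm0 label
    let rows := lm.map (fun row => row.sum)
    let cols := (List.range (lm.headD []).length).map
      (fun i => (lm.map (fun row => row.getD i 0)).sum)
    match pvFindBound rows with
    | none => (0, 0)                         -- exception in find_bound; excluded by Pre_
    | some (rs, re) =>
      match pvFindBound cols with
      | none => (0, 0)
      | some (cs, ce) => ((re - rs) + 1, (ce - cs) + 1)

-- ===== PORT B =====
def get_shape_alt (m : List (List Int)) (label : Int) : Int × Int :=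
  match m with
  | [] => (0, 0)                             -- len(m[0]) raises IndexError; excluded by Pre_
  | r0 :: _ =>
    let w := r0.length
    let st := m.foldl
      (fun (st : List Int × List Int) row =>
        (st.1 ++ [(PySem.List.slice row none (some (w : Int))).foldl
                    (fun a x => if x = label then a + label else a) 0],
         (st.2.zip row).map (fun cx => cx.1 + if cx.2 = label then label else 0)))
      ([], List.replicate w 0)
    match pvFindBound st.1 with
    | none => (0, 0)
    | some (rs, re) =>
      match pvFindBound st.2 with
      | none => (0, 0)
      | some (cs, ce) => ((re - rs) + 1, (ce - cs) + 1)

-- ===== PRECONDITION & SPEC =====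
-- find_bound(p) returns iff there is a 0→nonzero step at some i ∈ [1, len-2]
-- and a nonzero→0 step at some j ∈ [1, len-2] (otherwise RuntimeError or IndexError).
def pvOkPat (p : List Bool) : Bool :=
  ((List.range p.length).any (fun i =>
      decide (1 ≤ i) && decide (i + 2 ≤ p.length) && !(p.getD (i - 1) true) && p.getD i false)) &&
  ((List.range p.length).any (fun j =>
      decide (1 ≤ j) && decide (j + 2 ≤ p.length) && p.getD j false && !(p.getD (j + 1) true)))

-- Pre_ = exactly the inputs on which Python A returns: m nonempty, every row at least as
-- long as row 0 (else IndexError in copy), and both the row pattern and the column pattern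
-- of label-cells admit the bounds find_bound looks for (else RuntimeError/IndexError).
def Pre_get_shape (m : List (List Int)) (label : Int) : Prop :=
  m ≠ [] ∧ (∀ r ∈ m, (m.headD []).length ≤ r.length) ∧
  pvOkPat (m.map (fun r => decide (label ≠ 0 ∧ label ∈ r.take (m.headD []).length))) = true ∧
  pvOkPat ((List.range (m.headD []).length).map
    (fun j => decide (label ≠ 0 ∧ m.any (fun r => r.getD j 0 == label)))) = true

instance (m : List (List Int)) (label : Int) : Decidable (Pre_get_shape m label) := by
  unfold Pre_get_shape; infer_instance

def pvWitness_get_shape : List (List Int) × Int := ([[0, 0, 0], [0, 1, 0], [0, 0, 0]], 1)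

def Spec_get_shape (m : List (List Int)) (label : Int) (out : Int × Int) : Prop := out = get_shape_alt m label
instance (m : List (List Int)) (label : Int) (out : Int × Int) : Decidable (Spec_get_shape m label out) := by unfold Spec_get_shape; infer_instance

-- ===== CLAIM (what is proved, stated in full; the proofs are below) =====
def Claim_equal_get_shape : Prop := ∀ (m : List (List Int)) (label : Int), Dom_get_shape m label → Pre_get_shape m label → Spec_get_shape m label (get_shape m label)

-- ===== LEMMAS AND PROOFS =====

theorem pv_copyRow_eq (m : List (List Int)) (i : Nat) (row : List Int)
    (h : PySem.List.pyGet? m (i : Int) = some row) :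
    ∀ (w : Nat), w ≤ row.length → pvCopyRow m w i = some (row.take w) := by
  intro w
  induction w with
  | zero => intro _; simp [pvCopyRow]
  | succ w ih =>
    intro hw
    have hw' : w ≤ row.length := Nat.le_of_succ_le hw
    have := ih hw'
    unfold pvCopyRow at this ⊢
    rw [List.range_succ, List.foldl_append, this]
    simp only [List.foldl_cons, List.foldl_nil, Option.bind_some]
    rw [h]
    simp only [Option.bind_some, PySem.List.pyGet?_natCast]
    rw [List.getElem?_eq_getElem (by omega)]
    simp only [Option.map_some, Option.some.injEq]
    rw [List.take_add_one, List.getElem?_eq_getElem (by omega)]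
    simp

theorem pv_copy_loop (m : List (List Int)) (w : Nat) (hs : ∀ r ∈ m, w ≤ r.length) :
    ∀ (k : Nat), k ≤ m.length →
    (List.range k).foldl
      (fun acc i => acc.bind (fun lm => (pvCopyRow m w i).map (fun l => lm ++ [l])))
      (some []) = some ((m.take k).map (fun r => r.take w)) := by
  intro k
  induction k with
  | zero => intro _; simp
  | succ k ih =>
    intro hk
    have hk' : k ≤ m.length := Nat.le_of_succ_le hk
    rw [List.range_succ, List.foldl_append, ih hk']
    have hget : PySem.List.pyGet? m (k : Int) = some m[k] := by
      rw [PySem.List.pyGet?_natCast]; exact List.getElem?_eq_getElem (by omega)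
    have hcr := pv_copyRow_eq m k m[k] hget w (hs _ (List.getElem_mem (by omega)))
    rw [List.foldl_cons, List.foldl_nil, Option.bind_some, hcr]
    simp only [Option.map_some, Option.some.injEq]
    rw [List.take_add_one, List.getElem?_eq_getElem (show k < m.length by omega)]
    simp only [Option.toList_some, List.map_append, List.map_cons, List.map_nil]
    rfl

theorem pv_copy_eq (r0 : List Int) (rest : List (List Int))
    (hs : ∀ r ∈ r0 :: rest, r0.length ≤ r.length) :
    pvCopy (r0 :: rest) = some ((r0 :: rest).map (fun r => r.take r0.length)) := by
  show (List.range (r0 :: rest).length).foldl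
      (fun acc (i : Nat) => acc.bind (fun lm => (pvCopyRow (r0 :: rest) r0.length i).map (fun l => lm ++ [l])))
      (some []) = _
  rw [pv_copy_loop (r0 :: rest) r0.length hs (r0 :: rest).length le_rfl, List.take_length]

theorem pv_rowsum_eq (label : Int) (l : List Int) :
    ∀ (a : Int), l.foldl (fun a x => if x = label then a + label else a) a
      = a + (l.map (fun x => if x = label then label else 0)).sum := by
  induction l with
  | nil => intro a; simp
  | cons x t ih =>
    intro a
    simp only [List.foldl_cons, List.map_cons, List.sum_cons, ih]
    by_cases hx : x = label
    · simp [hx]; ring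
    · simp [hx]

theorem pv_cols_inv (label : Int) (w : Nat) :
    ∀ (ms : List (List Int)) (cols : List Int), cols.length = w → (∀ r ∈ ms, w ≤ r.length) →
    ms.foldl (fun c row => (c.zip row).map (fun cx => cx.1 + if cx.2 = label then label else 0)) cols
      = (List.range w).map
          (fun j => cols.getD j 0 + (ms.map (fun r => if r.getD j 0 = label then label else 0)).sum) := by
  intro ms
  induction ms with
  | nil =>
    intro cols hlen _
    simp only [List.foldl_nil, List.map_nil, List.sum_nil, add_zero]
    apply List.ext_getElem (by simp [hlen])
    intro j h1 h2
    simp only [List.getElem_map, List.getElem_range]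
    rw [List.getD_eq_getElem cols 0 (by omega)]
  | cons r t ih =>
    intro cols hlen hs
    have hrw : w ≤ r.length := hs r (by simp)
    have hzlen : ((cols.zip r).map (fun cx : Int × Int => cx.1 + if cx.2 = label then label else 0)).length = w := by
      simp [hlen]; omega
    rw [List.foldl_cons, ih _ hzlen (fun x hx => hs x (List.mem_cons_of_mem _ hx))]
    apply List.ext_getElem (by simp)
    intro j h1 h2
    have hjw : j < w := by simpa using h1
    simp only [List.getElem_map, List.getElem_range]
    have e1 : ((cols.zip r).map (fun cx : Int × Int => cx.1 + if cx.2 = label then label else 0)).getD j 0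
        = cols.getD j 0 + (if r.getD j 0 = label then label else 0) := by
      rw [List.getD_eq_getElem _ 0 (by omega)]
      simp only [List.getElem_map, List.getElem_zip]
      rw [List.getD_eq_getElem cols 0 (by omega), List.getD_eq_getElem r 0 (by omega)]
    rw [e1]
    simp only [List.map_cons, List.sum_cons]
    ring

theorem pv_main (m : List (List Int)) (label : Int) (hne : m ≠ [])
    (hs : ∀ r ∈ m, (m.headD []).length ≤ r.length) :
    get_shape m label = get_shape_alt m label := by
  obtain ⟨r0, rest, rfl⟩ : ∃ r0 rest, m = r0 :: rest := by
    cases m with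
    | nil => exact absurd rfl hne
    | cons a t => exact ⟨a, t, rfl⟩
  have hs' : ∀ r ∈ r0 :: rest, r0.length ≤ r.length := by simpa using hs
  set w := r0.length with hw
  -- A side: computed rows and cols
  have hcopy := pv_copy_eq r0 rest hs'
  set f : Int → Int := fun x => if x = label then label else 0 with hf
  have hfe : (fun x : Int => if x ≠ label then 0 else x) = f := by
    funext x; by_cases hx : x = label <;> simp [hf, hx]
  -- B side components
  have hsplit := PySem.List.foldl_prod_mk
    (f := fun (acc : List Int) (row : List Int) =>
      acc ++ [(PySem.List.slice row none (some (w : Int))).foldl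
                (fun a x => if x = label then a + label else a) 0])
    (g := fun (acc : List Int) (row : List Int) =>
      (acc.zip row).map (fun cx => cx.1 + if cx.2 = label then label else 0))
    (l := r0 :: rest) (a := []) (b := List.replicate w 0)
  have hrowsB : (r0 :: rest).foldl
      (fun (acc : List Int) row => acc ++ [(PySem.List.slice row none (some (w : Int))).foldl
          (fun a x => if x = label then a + label else a) 0]) []
      = (r0 :: rest).map (fun r => ((r.take w).map f).sum) := by
    rw [PySem.List.foldl_append_singleton_eq_map]
    simp only [List.nil_append]
    apply List.map_congr_left
    intro r _
    rw [PySem.List.slice_to_natCast, pv_rowsum_eq label]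
    simp [hf]
  have hcolsB : (r0 :: rest).foldl
      (fun (acc : List Int) row => (acc.zip row).map (fun cx => cx.1 + if cx.2 = label then label else 0))
      (List.replicate w 0)
      = (List.range w).map (fun j => ((r0 :: rest).map (fun r => f (r.getD j 0))).sum) := by
    rw [pv_cols_inv label w (r0 :: rest) _ (by simp) hs']
    apply List.map_congr_left
    intro j _
    simp [hf]
  -- assemble
  unfold get_shape get_shape_alt
  rw [hcopy]
  simp only []
  rw [hsplit]
  simp only [hrowsB, hcolsB]
  -- identify A's rows with B's rows
  have hclean : pvClean ((r0 :: rest).map (fun r => r.take w)) label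
      = (r0 :: rest).map (fun r => (r.take w).map f) := by
    unfold pvClean
    rw [List.map_map]
    apply List.map_congr_left
    intro r _
    show (List.take r0.length r).map (fun x => if x ≠ label then 0 else x) = (List.take r0.length r).map f
    apply List.map_congr_left
    intro x _
    by_cases hx : x = label <;> simp [hf, hx]
  rw [hclean]
  have hhead : (((r0 :: rest).map (fun r => (r.take w).map f)).headD []).length = w := by
    simp [hw]
  have hrowsA : ((r0 :: rest).map (fun r => (r.take w).map f)).map (fun row => row.sum)
      = (r0 :: rest).map (fun r => ((r.take w).map f).sum) := by
    rw [List.map_map]; rfl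
  have hcolsA : (List.range (((r0 :: rest).map (fun r => (r.take w).map f)).headD []).length).map
      (fun i => (((r0 :: rest).map (fun r => (r.take w).map f)).map (fun row => row.getD i 0)).sum)
      = (List.range w).map (fun j => ((r0 :: rest).map (fun r => f (r.getD j 0))).sum) := by
    rw [hhead]
    apply List.map_congr_left
    intro j hj
    have hjw : j < w := List.mem_range.mp hj
    congr 1
    rw [List.map_map]
    apply List.map_congr_left
    intro r hr
    have hrl : w ≤ r.length := hs' r hr
    have h1 : j < (r.take w).length := by simp; omega
    simp only [Function.comp]
    rw [List.getD_eq_getElem _ 0 (by simpa using h1), List.getD_eq_getElem r 0 (by omega)]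
    simp
  rw [hrowsA, hcolsA]

-- ===== VERDICT (by name: the statement is the Claim_ definition above) =====
theorem get_shape_spec : Claim_equal_get_shape := by
  intro m label _ hpre
  unfold Spec_get_shape
  exact pv_main m label hpre.1 hpre.2.1
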